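-- pv_equiv track=rewrite | github.com/diplomacy/research | diplomacy_research/utils/cluster_config/supervised.py | _get_ps_specs
-- ===== SOURCE A (Python) =====
-- def _get_ps_specs(nodes, min_nb_ps, max_nb_ps, using_cpu_only, grpc_port):
--     """ Returns the list of ip:port for all ps nodes """
--     ps_specs = []
--     if using_cpu_only:
--         for node_ip in nodes.values():
--             for ps_ix in range(max(min_nb_ps, max_nb_ps)):
--                 ps_specs += ['%s:%d' % (node_ip, grpc_port + 100 + ps_ix)]
--     else:
--         node_ips = list(nodes.values())
--         ps_by_node = {node_ip: [] for node_ip in nodes.values()}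
--
--         # Spawning the minimum
--         for ps_ix in range(min_nb_ps):
--             node_ip = node_ips[ps_ix % len(node_ips)]
--             ps_by_node[node_ip] += ['%s:%d' % (node_ip, grpc_port + 100 + len(ps_by_node[node_ip]))]
--
--         # Spawning 1 per node until the maximum
--         for ps_ix in range(min_nb_ps, max_nb_ps):
--             node_ip = node_ips[ps_ix % len(node_ips)]
--             if not ps_by_node[node_ip]:
--                 ps_by_node[node_ip] += ['%s:%d' % (node_ip, grpc_port + 100 + len(ps_by_node[node_ip]))]
--
--         # Merging
--         for node_ip in ps_by_node:
--             ps_specs += ps_by_node[node_ip]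
--
--     return ps_specs
-- ===== SOURCE B (Python) =====
-- def _get_ps_specs(nodes, min_nb_ps, max_nb_ps, using_cpu_only, grpc_port):
--     """ Returns the list of ip:port for all ps nodes """
--     if using_cpu_only:
--         return ['%s:%d' % (node_ip, grpc_port + 100 + ps_ix)
--                 for node_ip in nodes.values()
--                 for ps_ix in range(max(min_nb_ps, max_nb_ps))]
--
--     node_ips = list(nodes.values())
--     nb_nodes = len(node_ips)
--     if nb_nodes == 0:
--         return []
--
--     # Closed-form round-robin: position i of node_ips receives q ps tasks,
--     # plus one more if i < r, where min tasks = q * nb_nodes + r.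
--     lo = max(min_nb_ps, 0)
--     q, r = divmod(lo, nb_nodes)
--     span = max_nb_ps - min_nb_ps
--     start = min_nb_ps % nb_nodes
--
--     counts = {node_ip: 0 for node_ip in node_ips}
--     topup = {node_ip: False for node_ip in node_ips}
--     for i, node_ip in enumerate(node_ips):
--         counts[node_ip] += q + (1 if i < r else 0)
--         # position i is visited by some ps_ix in range(min_nb_ps, max_nb_ps)
--         if span > 0 and (i - start) % nb_nodes < span:
--             topup[node_ip] = True
--
--     return ['%s:%d' % (node_ip, grpc_port + 100 + j)
--             for node_ip, cnt in counts.items()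
--             for j in range(cnt if cnt else (1 if topup[node_ip] else 0))]
-- ===== Notes on version B (the rewrite author's own statement) =====
-- stated objective: alternative
-- what changed: A simulates the round-robin task-by-task, appending one 'ip:port' string per ps task into a dict of lists over range(min_nb_ps) and range(min_nb_ps, max_nb_ps); B computes each node's task count in closed form (divmod of the minimum over the node count, plus a modular-interval test telling whether the top-up pass visits the node, aggregated per ip in one pass over the node list) and emits each ip's block of specs directly.
import Mathlib
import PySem

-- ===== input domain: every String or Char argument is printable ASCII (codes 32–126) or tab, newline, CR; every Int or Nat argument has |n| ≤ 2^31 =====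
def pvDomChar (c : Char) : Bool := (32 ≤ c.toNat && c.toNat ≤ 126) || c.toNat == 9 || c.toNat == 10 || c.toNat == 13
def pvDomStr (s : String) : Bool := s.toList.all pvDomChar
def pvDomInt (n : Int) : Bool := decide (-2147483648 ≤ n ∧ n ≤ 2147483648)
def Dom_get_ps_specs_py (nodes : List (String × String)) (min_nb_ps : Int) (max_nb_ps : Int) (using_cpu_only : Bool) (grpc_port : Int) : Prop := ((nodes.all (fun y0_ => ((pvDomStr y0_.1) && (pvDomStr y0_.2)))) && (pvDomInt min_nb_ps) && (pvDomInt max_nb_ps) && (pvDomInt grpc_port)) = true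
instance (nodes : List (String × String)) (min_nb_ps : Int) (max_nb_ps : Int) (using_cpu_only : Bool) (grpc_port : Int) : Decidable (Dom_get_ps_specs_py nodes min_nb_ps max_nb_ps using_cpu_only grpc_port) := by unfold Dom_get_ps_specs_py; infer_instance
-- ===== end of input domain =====

-- B replaces A's per-task round-robin simulation (one dict-of-lists update per ps task) by a
-- closed-form per-node count (divmod for the minimum, a modular-interval test for the top-up pass)
-- and emits each node's specs in one final pass; objective: alternative (same result, different algorithm).

-- ===== PORT A =====
/-- shared formatting helper: `'%s:%d' % (ip, port)` (both Pythons use this same expression) -/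
def pvLabel (ip : String) (p : Int) : String := String.ofList (ip.toList ++ ':' :: PySem.Int.toChars p)

def get_ps_specs_py (nodes : List (String × String)) (min_nb_ps : Int) (max_nb_ps : Int) (using_cpu_only : Bool) (grpc_port : Int) : List String :=
  let d := PySem.Dict.ofList nodes
  if using_cpu_only then
    d.values.foldl (fun ps_specs node_ip =>
      (PySem.List.pyRange 0 (max min_nb_ps max_nb_ps) 1).foldl
        (fun acc ps_ix => acc ++ [pvLabel node_ip (grpc_port + 100 + ps_ix)]) ps_specs) []
  else
    let node_ips := d.values
    let ps_by_node0 : PySem.Dict String (List String) :=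
      node_ips.foldl (fun m node_ip => m.insert node_ip []) PySem.Dict.empty
    -- Spawning the minimum
    let ps_by_node1 := (PySem.List.pyRange 0 min_nb_ps 1).foldl (fun m ps_ix =>
        let node_ip := PySem.List.pyGetD node_ips (PySem.Int.mod ps_ix (PySem.List.len node_ips)) ""
        m.modify node_ip [] (fun l => l ++ [pvLabel node_ip (grpc_port + 100 + (l.length : Int))])) ps_by_node0
    -- Spawning 1 per node until the maximum
    let ps_by_node2 := (PySem.List.pyRange min_nb_ps max_nb_ps 1).foldl (fun m ps_ix =>
        let node_ip := PySem.List.pyGetD node_ips (PySem.Int.mod ps_ix (PySem.List.len node_ips)) ""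
        if (m.getD node_ip []).isEmpty then
          m.modify node_ip [] (fun l => l ++ [pvLabel node_ip (grpc_port + 100 + (l.length : Int))])
        else m) ps_by_node1
    -- Merging
    ps_by_node2.keys.foldl (fun ps_specs node_ip => ps_specs ++ ps_by_node2.getD node_ip []) []

-- ===== PORT B =====
def get_ps_specs_py_alt (nodes : List (String × String)) (min_nb_ps : Int) (max_nb_ps : Int) (using_cpu_only : Bool) (grpc_port : Int) : List String :=
  let d := PySem.Dict.ofList nodes
  if using_cpu_only then
    d.values.flatMap (fun node_ip =>
      (PySem.List.pyRange 0 (max min_nb_ps max_nb_ps) 1).map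
        (fun ps_ix => pvLabel node_ip (grpc_port + 100 + ps_ix)))
  else
    let node_ips := d.values
    let nb_nodes : Int := PySem.List.len node_ips
    if nb_nodes = 0 then []
    else
      let lo := max min_nb_ps 0
      let q := PySem.Int.floordiv lo nb_nodes
      let r := PySem.Int.mod lo nb_nodes
      let span := max_nb_ps - min_nb_ps
      let start := PySem.Int.mod min_nb_ps nb_nodes
      let st := (PySem.List.enumerate node_ips 0).foldl
        (fun (st : PySem.Dict String Int × PySem.Dict String Bool) p =>
          (st.1.modify p.2 0 (fun c => c + (q + if p.1 < r then 1 else 0)),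
           if 0 < span ∧ PySem.Int.mod (p.1 - start) nb_nodes < span then st.2.insert p.2 true else st.2))
        (node_ips.foldl (fun m node_ip => m.insert node_ip (0 : Int)) PySem.Dict.empty,
         node_ips.foldl (fun m node_ip => m.insert node_ip false) PySem.Dict.empty)
      st.1.items.flatMap (fun kv =>
        (PySem.List.pyRange 0 (if kv.2 ≠ 0 then kv.2 else if st.2.getD kv.1 false then 1 else 0) 1).map
          (fun j => pvLabel kv.1 (grpc_port + 100 + j)))

-- ===== PRECONDITION & SPEC =====
-- Pre_ excludes exactly the inputs where A raises ZeroDivisionError: the non-CPU branch with an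
-- empty nodes dict and at least one round-robin iteration to perform (min_nb_ps > 0 or min_nb_ps < max_nb_ps).
def Pre_get_ps_specs_py (nodes : List (String × String)) (min_nb_ps : Int) (max_nb_ps : Int) (using_cpu_only : Bool) (grpc_port : Int) : Prop :=
  using_cpu_only = true ∨ nodes ≠ [] ∨ (min_nb_ps ≤ 0 ∧ max_nb_ps ≤ min_nb_ps)
instance (nodes : List (String × String)) (min_nb_ps : Int) (max_nb_ps : Int) (using_cpu_only : Bool) (grpc_port : Int) : Decidable (Pre_get_ps_specs_py nodes min_nb_ps max_nb_ps using_cpu_only grpc_port) := by unfold Pre_get_ps_specs_py; infer_instance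

def pvWitness_get_ps_specs_py : (List (String × String)) × Int × Int × Bool × Int :=
  ([("node1", "10.0.0.1"), ("node2", "10.0.0.2")], 3, 4, false, 9000)

def Spec_get_ps_specs_py (nodes : List (String × String)) (min_nb_ps : Int) (max_nb_ps : Int) (using_cpu_only : Bool) (grpc_port : Int) (out : List String) : Prop := out = get_ps_specs_py_alt nodes min_nb_ps max_nb_ps using_cpu_only grpc_port
instance (nodes : List (String × String)) (min_nb_ps : Int) (max_nb_ps : Int) (using_cpu_only : Bool) (grpc_port : Int) (out : List String) : Decidable (Spec_get_ps_specs_py nodes min_nb_ps max_nb_ps using_cpu_only grpc_port out) := by unfold Spec_get_ps_specs_py; infer_instance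

-- ===== CLAIM (what is proved, stated in full; the proofs are below) =====
def Claim_equal_get_ps_specs_py : Prop := ∀ (nodes : List (String × String)) (min_nb_ps : Int) (max_nb_ps : Int) (using_cpu_only : Bool) (grpc_port : Int), Dom_get_ps_specs_py nodes min_nb_ps max_nb_ps using_cpu_only grpc_port → Pre_get_ps_specs_py nodes min_nb_ps max_nb_ps using_cpu_only grpc_port → Spec_get_ps_specs_py nodes min_nb_ps max_nb_ps using_cpu_only grpc_port (get_ps_specs_py nodes min_nb_ps max_nb_ps using_cpu_only grpc_port)
-- ===== LEMMAS AND PROOFS =====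

/-- index selected by the round-robin: `node_ips[k % len(node_ips)]` -/
def pvIdx (vals : List String) (k : Int) : String :=
  PySem.List.pyGetD vals (PySem.Int.mod k (PySem.List.len vals)) ""

/-- the block of labels a node with count `c` contributes -/
def pvLabels (g : Int) (ip : String) (c : Nat) : List String :=
  (List.range c).map (fun (j : Nat) => pvLabel ip (g + 100 + (j : Int)))

/-- count of minimum-phase tasks a given ip receives -/
def pvC1 (vals : List String) (mn : Int) (ip : String) : Nat :=
  (PySem.List.pyRange 0 mn 1).countP (fun k => pvIdx vals k == ip)

/-- whether the top-up phase visits a given ip -/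
def pvTouch (vals : List String) (mn mx : Int) (ip : String) : Bool :=
  (PySem.List.pyRange mn mx 1).any (fun k => pvIdx vals k == ip)

/-- final number of ps specs per ip -/
def pvCA (vals : List String) (mn mx : Int) (ip : String) : Nat :=
  if pvC1 vals mn ip = 0 then (if pvTouch vals mn mx ip then 1 else 0) else pvC1 vals mn ip

theorem pv_keys_of_items {ν : Type} (uniq : List String) (f : String → ν)
    (d : PySem.Dict String ν) (hd : d.items = uniq.map fun ip => (ip, f ip)) : d.keys = uniq := by
  simp only [PySem.Dict.keys, hd, List.map_map]
  exact List.map_congr_left (fun a _ => rfl) |>.trans (List.map_id _)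

theorem pv_getD_of_items {ν : Type} (uniq : List String) (hnd : uniq.Nodup) (f : String → ν)
    (d : PySem.Dict String ν) (hd : d.items = uniq.map fun ip => (ip, f ip))
    (ip : String) (hip : ip ∈ uniq) (d0 : ν) : d.getD ip d0 = f ip := by
  apply PySem.Dict.getD_of_mem_items
  · rw [hd]; exact List.mem_map_of_mem hip
  · rw [pv_keys_of_items uniq f d hd]; exact hnd

theorem pv_contains_of_items {ν : Type} (uniq : List String) (f : String → ν)
    (d : PySem.Dict String ν) (hd : d.items = uniq.map fun ip => (ip, f ip))
    (ip : String) (hip : ip ∈ uniq) : d.contains ip = true := by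
  rw [PySem.Dict.contains_iff_mem_keys, pv_keys_of_items uniq f d hd]; exact hip

theorem pv_items_insert {ν : Type} (uniq : List String) (f : String → ν)
    (d : PySem.Dict String ν) (hd : d.items = uniq.map fun ip => (ip, f ip))
    (ip0 : String) (h0 : ip0 ∈ uniq) (w : ν) :
    (d.insert ip0 w).items = uniq.map fun ip => (ip, if ip = ip0 then w else f ip) := by
  rw [PySem.Dict.items_insert_of_contains _ _ (pv_contains_of_items uniq f d hd ip0 h0), hd,
    List.map_map]
  apply List.map_congr_left
  intro ip _
  by_cases h : ip = ip0 <;> simp [h]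

theorem pv_items_init {ν : Type} (vals : List String) (v : ν) :
    (vals.foldl (fun m ip => m.insert ip v) PySem.Dict.empty).items
      = (PySem.Set.ofList vals).map (fun ip => (ip, v)) := by
  induction vals using List.reverseRecOn with
  | nil => simp [PySem.Dict.empty, PySem.Set.ofList]
  | append_singleton xs x ih =>
      rw [List.foldl_append, List.foldl_cons, List.foldl_nil, PySem.Set.ofList_append_singleton,
        PySem.Set.add_eq_ite]
      by_cases hx : x ∈ PySem.Set.ofList xs
      · rw [if_pos hx, pv_items_insert _ _ _ ih x hx]
        apply List.map_congr_left
        intro ip _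
        by_cases h : ip = x <;> simp [h]
      · rw [if_neg hx, PySem.Dict.items_insert_of_not_contains, ih, List.map_append]
        · simp
        · have := pv_keys_of_items _ (fun _ => v) _ ih
          rw [show ((List.foldl (fun m ip => m.insert ip v) PySem.Dict.empty xs).contains x = false)
              ↔ ¬ ((List.foldl (fun m ip => m.insert ip v) PySem.Dict.empty xs).contains x = true) by simp,
            PySem.Dict.contains_iff_mem_keys, this]
          simpa using hx

theorem pvLabels_length (g : Int) (ip : String) (c : Nat) : (pvLabels g ip c).length = c := by
  simp [pvLabels]
theorem pvLabels_succ (g : Int) (ip : String) (c : Nat) :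
    pvLabels g ip (c + 1) = pvLabels g ip c ++ [pvLabel ip (g + 100 + (c : Int))] := by
  simp [pvLabels, List.range_succ]

theorem pv_loop1 (vals : List String) (g : Int) (ks : List Int) (uniq : List String)
    (hnd : uniq.Nodup) (hks : ∀ k ∈ ks, pvIdx vals k ∈ uniq) (f : String → Nat)
    (d : PySem.Dict String (List String))
    (hd : d.items = uniq.map fun ip => (ip, pvLabels g ip (f ip))) :
    (ks.foldl (fun m ps_ix =>
        m.modify (pvIdx vals ps_ix) []
          (fun l => l ++ [pvLabel (pvIdx vals ps_ix) (g + 100 + (l.length : Int))])) d).items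
      = uniq.map fun ip => (ip, pvLabels g ip (f ip + ks.countP (fun k => pvIdx vals k == ip))) := by
  induction ks generalizing f d with
  | nil => simpa using hd
  | cons k ks ih =>
      rw [List.foldl_cons]
      have hk0 : pvIdx vals k ∈ uniq := hks k List.mem_cons_self
      have hval : d.getD (pvIdx vals k) [] = pvLabels g (pvIdx vals k) (f (pvIdx vals k)) :=
        pv_getD_of_items uniq hnd _ d hd _ hk0 []
      have hmod : (d.modify (pvIdx vals k) []
          (fun l => l ++ [pvLabel (pvIdx vals k) (g + 100 + (l.length : Int))])).items
          = uniq.map fun ip => (ip, pvLabels g ip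
              (if ip = pvIdx vals k then f ip + 1 else f ip)) := by
        show (d.insert (pvIdx vals k) _).items = _
        rw [hval, pv_items_insert uniq _ d hd _ hk0]
        apply List.map_congr_left
        intro ip _
        by_cases h : ip = pvIdx vals k
        · subst h; simp [pvLabels_length, pvLabels_succ]
        · simp [h]
      rw [ih (fun k hk => hks k (List.mem_cons_of_mem _ hk)) _ _ hmod]
      apply List.map_congr_left
      intro ip _
      rw [List.countP_cons]
      by_cases h : ip = pvIdx vals k
      · have : (pvIdx vals k == ip) = true := by simp [h]
        simp only [if_pos h, this, if_true]
        congr 2 <;> omega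
      · have : (pvIdx vals k == ip) = false := by simp; exact fun hc => h hc.symm
        simp only [if_neg h, this]
        congr 2 <;> omega

theorem pv_loop2 (vals : List String) (g : Int) (ks : List Int) (uniq : List String)
    (hnd : uniq.Nodup) (hks : ∀ k ∈ ks, pvIdx vals k ∈ uniq) (f : String → Nat)
    (d : PySem.Dict String (List String))
    (hd : d.items = uniq.map fun ip => (ip, pvLabels g ip (f ip))) :
    (ks.foldl (fun m ps_ix =>
        if (m.getD (pvIdx vals ps_ix) []).isEmpty then
          m.modify (pvIdx vals ps_ix) []
            (fun l => l ++ [pvLabel (pvIdx vals ps_ix) (g + 100 + (l.length : Int))])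
        else m) d).items
      = uniq.map fun ip => (ip, pvLabels g ip
          (if f ip = 0 then (if ks.any (fun k => pvIdx vals k == ip) then 1 else 0) else f ip)) := by
  induction ks generalizing f d with
  | nil =>
      rw [List.foldl_nil, hd]
      apply List.map_congr_left; intro ip _
      by_cases h : f ip = 0 <;> simp [h]
  | cons k ks ih =>
      rw [List.foldl_cons]
      have hk0 : pvIdx vals k ∈ uniq := hks k List.mem_cons_self
      have hval : d.getD (pvIdx vals k) [] = pvLabels g (pvIdx vals k) (f (pvIdx vals k)) :=
        pv_getD_of_items uniq hnd _ d hd _ hk0 []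
      have hemp : (d.getD (pvIdx vals k) []).isEmpty = decide (f (pvIdx vals k) = 0) := by
        rw [hval]
        rcases Nat.eq_zero_or_pos (f (pvIdx vals k)) with h | h
        · simp [h, pvLabels]
        · have : pvLabels g (pvIdx vals k) (f (pvIdx vals k)) ≠ [] := by
            intro hc
            have := pvLabels_length g (pvIdx vals k) (f (pvIdx vals k))
            rw [hc] at this; simp at this; omega
          have hne : f (pvIdx vals k) ≠ 0 := by omega
          rw [Bool.eq_iff_iff]
          simp [List.isEmpty_iff, this, hne]
      by_cases hz : f (pvIdx vals k) = 0
      · rw [if_pos (by simp [hemp, hz])]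
        have hmod : (d.modify (pvIdx vals k) []
              (fun l => l ++ [pvLabel (pvIdx vals k) (g + 100 + (l.length : Int))])).items
            = uniq.map fun ip => (ip, pvLabels g ip
                (if ip = pvIdx vals k then 1 else f ip)) := by
          show (d.insert (pvIdx vals k) _).items = _
          rw [hval, pv_items_insert uniq _ d hd _ hk0]
          apply List.map_congr_left
          intro ip _
          by_cases h : ip = pvIdx vals k
          · subst h; simp [hz, pvLabels]
          · simp [h]
        rw [ih (fun k hk => hks k (List.mem_cons_of_mem _ hk)) _ _ hmod]
        apply List.map_congr_left
        intro ip _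
        rw [List.any_cons]
        by_cases h : ip = pvIdx vals k
        · have hb : (pvIdx vals k == ip) = true := by simp [h]
          simp [h, hb, hz]
        · have hb : (pvIdx vals k == ip) = false := by simp; exact fun hc => h hc.symm
          simp only [if_neg h, hb, Bool.false_or]
      · rw [if_neg (by simp [hemp, hz])]
        rw [ih (fun k hk => hks k (List.mem_cons_of_mem _ hk)) _ _ hd]
        apply List.map_congr_left
        intro ip _
        rw [List.any_cons]
        by_cases h : ip = pvIdx vals k
        · subst h; simp [hz]
        · have hb : (pvIdx vals k == ip) = false := by simp; exact fun hc => h hc.symm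
          simp only [hb, Bool.false_or]

theorem pv_loopC (inc : Int → Int) (ps : List (Int × String)) (uniq : List String)
    (hnd : uniq.Nodup) (hps : ∀ p ∈ ps, p.2 ∈ uniq) (f : String → Int)
    (d : PySem.Dict String Int) (hd : d.items = uniq.map fun ip => (ip, f ip)) :
    (ps.foldl (fun m p => m.modify p.2 0 (fun c => c + inc p.1)) d).items
      = uniq.map fun ip => (ip, f ip + ((ps.filter (fun p => p.2 == ip)).map (fun p => inc p.1)).sum) := by
  induction ps generalizing f d with
  | nil => simpa using hd
  | cons p ps ih =>
      rw [List.foldl_cons]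
      have hp0 : p.2 ∈ uniq := hps p List.mem_cons_self
      have hval : d.getD p.2 0 = f p.2 := pv_getD_of_items uniq hnd _ d hd _ hp0 0
      have hmod : (d.modify p.2 0 (fun c => c + inc p.1)).items
          = uniq.map fun ip => (ip, if ip = p.2 then f ip + inc p.1 else f ip) := by
        show (d.insert p.2 _).items = _
        rw [hval, pv_items_insert uniq _ d hd _ hp0]
        apply List.map_congr_left
        intro ip _
        by_cases h : ip = p.2 <;> simp [h]
      rw [ih (fun q hq => hps q (List.mem_cons_of_mem _ hq)) _ _ hmod]
      apply List.map_congr_left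
      intro ip _
      rw [List.filter_cons]
      by_cases h : ip = p.2
      · have hb : (p.2 == ip) = true := by simp [h]
        simp only [hb, if_pos h, if_true, List.map_cons, List.sum_cons]
        ring_nf
      · have hb : (p.2 == ip) = false := by simp; exact fun hc => h hc.symm
        simp only [hb, if_neg h, Bool.false_eq_true, if_false]

theorem pv_loopT (cond : Int → Prop) [DecidablePred cond] (ps : List (Int × String)) (uniq : List String)
    (hnd : uniq.Nodup) (hps : ∀ p ∈ ps, p.2 ∈ uniq) (f : String → Bool)
    (d : PySem.Dict String Bool) (hd : d.items = uniq.map fun ip => (ip, f ip)) :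
    (ps.foldl (fun m p => if cond p.1 then m.insert p.2 true else m) d).items
      = uniq.map fun ip => (ip, f ip || ps.any (fun p => decide (cond p.1) && p.2 == ip)) := by
  induction ps generalizing f d with
  | nil => simpa using hd
  | cons p ps ih =>
      rw [List.foldl_cons]
      have hp0 : p.2 ∈ uniq := hps p List.mem_cons_self
      by_cases hc : cond p.1
      · rw [if_pos hc]
        have hmod : (d.insert p.2 true).items
            = uniq.map fun ip => (ip, if ip = p.2 then true else f ip) :=
          pv_items_insert uniq _ d hd _ hp0 true
        rw [ih (fun q hq => hps q (List.mem_cons_of_mem _ hq)) _ _ hmod]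
        apply List.map_congr_left
        intro ip _
        rw [List.any_cons]
        by_cases h : ip = p.2
        · have hb : (p.2 == ip) = true := by simp [h]
          simp [h, hb, hc]
        · have hb : (p.2 == ip) = false := by simp; exact fun hd' => h hd'.symm
          simp [h, hb]
      · rw [if_neg hc]
        rw [ih (fun q hq => hps q (List.mem_cons_of_mem _ hq)) _ _ hd]
        apply List.map_congr_left
        intro ip _
        rw [List.any_cons]
        simp [hc]

-- step fact: per-position count increment when extending the range by one
theorem pv_step_nat (N m i : Nat) (hN : 0 < N) (hi : i < N) :
    (m + 1) / N + (if i < (m + 1) % N then 1 else 0)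
      = (m / N + (if i < m % N then 1 else 0)) + (if i = m % N then 1 else 0) := by
  have hd := Nat.div_add_mod m N
  have he : m % N < N := Nat.mod_lt m hN
  have hmul : (m / N + 1) * N = N * (m / N) + N := by ring
  by_cases hc : m % N + 1 = N
  · have h1 : (m + 1) / N = m / N + 1 := by
      have : m + 1 = (m / N + 1) * N := by omega
      rw [this, Nat.mul_div_cancel _ hN]
    have h2 : (m + 1) % N = 0 := by
      have : m + 1 = (m / N + 1) * N := by omega
      rw [this, Nat.mul_mod_left]
    rw [h1, h2]
    split_ifs <;> omega
  · have h1 : (m + 1) / N = m / N := by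
      have : m + 1 = (m % N + 1) + N * (m / N) := by omega
      rw [this, Nat.add_mul_div_left _ _ hN, Nat.div_eq_of_lt (by omega)]
      omega
    have h2 : (m + 1) % N = m % N + 1 := by
      have : m + 1 = (m % N + 1) + N * (m / N) := by omega
      rw [this, Nat.add_mul_mod_self_left, Nat.mod_eq_of_lt (by omega)]
    rw [h1, h2]
    split_ifs <;> omega

theorem pv_sum_map_delta (l : List Nat) (i0 : Nat) :
    (l.map (fun i => if i = i0 then 1 else 0)).sum = l.count i0 := by
  induction l with
  | nil => simp
  | cons a l ih => simp [List.count_cons, ih, Nat.add_comm]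

theorem pv_delta_sum (N i0 : Nat) (hi0 : i0 < N) (P : Nat → Bool) :
    (((List.range N).filter P).map (fun i => if i = i0 then 1 else 0)).sum
      = if P i0 then 1 else 0 := by
  rw [pv_sum_map_delta]
  by_cases hP : P i0
  · rw [List.count_filter (by simp [hP])]
    simp [hP, List.count_eq_one_of_mem (List.nodup_range) (List.mem_range.mpr hi0)]
  · rw [List.count_eq_zero.mpr (by simp [List.mem_filter, hP])]
    simp [hP]

theorem pv_count_nat (N m : Nat) (hN : 0 < N) (vals : List String) (ip : String) :
    (List.range m).countP (fun k => vals.getD (k % N) "" == ip)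
      = (((List.range N).filter (fun i => vals.getD i "" == ip)).map
          (fun i => m / N + if i < m % N then 1 else 0)).sum := by
  induction m with
  | zero => simp [Nat.zero_div, Nat.zero_mod]
  | succ m ih =>
      rw [List.range_succ, List.countP_append, ih]
      have hsplit : (((List.range N).filter (fun i => vals.getD i "" == ip)).map
            (fun i => (m + 1) / N + if i < (m + 1) % N then 1 else 0)).sum
          = (((List.range N).filter (fun i => vals.getD i "" == ip)).map
              (fun i => m / N + if i < m % N then 1 else 0)).sum
            + (((List.range N).filter (fun i => vals.getD i "" == ip)).map
              (fun i => if i = m % N then 1 else 0)).sum := by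
        rw [← List.sum_map_add]
        apply congrArg
        apply List.map_congr_left
        intro i hi
        have hiN : i < N := by
          have := List.mem_range.mp (List.mem_of_mem_filter hi)
          exact this
        exact pv_step_nat N m i hN hiN
      rw [hsplit, pv_delta_sum N (m % N) (Nat.mod_lt m hN) _]
      simp [List.countP_cons]

theorem pv_res (n mn mx j : Int) (hn : 0 < n) (hj0 : 0 ≤ j) (hjn : j < n) :
    (∃ k, (mn ≤ k ∧ k < mx) ∧ k % n = j) ↔ (0 < mx - mn ∧ (j - mn % n) % n < mx - mn) := by
  constructor
  · rintro ⟨k, ⟨hk1, hk2⟩, hkj⟩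
    have hspan : 0 < mx - mn := by omega
    refine ⟨hspan, ?_⟩
    have he1 : (j - mn % n) % n = (k - mn) % n := by
      rw [← hkj]
      conv_rhs => rw [Int.sub_emod]
    rw [he1]
    by_cases hbig : n ≤ mx - mn
    · exact lt_of_lt_of_le (Int.emod_lt_of_pos _ hn) hbig
    · rw [Int.emod_eq_of_lt (by omega) (by omega)]
      omega
  · rintro ⟨hspan, hlt⟩
    have he0 : 0 ≤ (j - mn % n) % n := Int.emod_nonneg _ (by omega)
    refine ⟨mn + (j - mn % n) % n, ⟨by omega, by omega⟩, ?_⟩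
    have h1 : (mn + (j - mn % n) % n) % n = (mn % n + (j - mn % n) % n) % n := by
      rw [Int.add_emod, Int.emod_emod_of_dvd _ dvd_rfl]
    have h2 : mn + (j - mn % n) = j + n * (mn / n) := by
      have := Int.ediv_add_emod mn n
      omega
    rw [h1, ← Int.add_emod, h2, Int.add_mul_emod_self_left, Int.emod_eq_of_lt hj0 hjn]

theorem pv_enum (vals : List String) :
    PySem.List.enumerate vals 0 = (List.range vals.length).map (fun (i : Nat) => ((i : Int), vals.getD i "")) := by
  rw [PySem.List.enumerate_eq_map_pyRange vals "", PySem.List.len_eq, PySem.List.pyRange_zero_nat,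
    List.map_map]
  apply List.map_congr_left
  intro i _
  simp [PySem.List.pyGetD_natCast]

theorem pv_C1_eq (vals : List String) (mn : Int) (ip : String) (hv : vals ≠ []) :
    ((pvC1 vals mn ip : Int))
      = (((PySem.List.enumerate vals 0).filter (fun p => p.2 == ip)).map
          (fun p => PySem.Int.floordiv (max mn 0) (PySem.List.len vals)
            + if p.1 < PySem.Int.mod (max mn 0) (PySem.List.len vals) then 1 else 0)).sum := by
  have hN : 0 < vals.length := List.length_pos_iff.mpr hv
  have hmax : max mn 0 = ((mn.toNat : Nat) : Int) := (Int.ofNat_toNat mn).symm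
  have hLHS : pvC1 vals mn ip
      = (List.range mn.toNat).countP (fun k => vals.getD (k % vals.length) "" == ip) := by
    unfold pvC1
    rw [PySem.List.pyRange_zero mn, List.countP_map]
    congr 1
    funext k
    have hk1 : pvIdx vals (k : Int) = vals.getD (k % vals.length) "" := by
      unfold pvIdx
      rw [PySem.List.len_eq, PySem.Int.mod_natCast, PySem.List.pyGetD_natCast]
    simp only [Function.comp_apply, hk1]
  rw [hLHS, pv_count_nat vals.length mn.toNat hN vals ip, pv_enum, List.filter_map, List.map_map,
    Nat.cast_list_sum, List.map_map]
  have hfil : ((fun (p : Int × String) => p.2 == ip) ∘ fun (i : Nat) => ((i : Int), vals.getD i ""))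
      = fun (i : Nat) => vals.getD i "" == ip := rfl
  rw [hfil]
  congr 1
  apply List.map_congr_left
  intro i hi
  simp only [Function.comp_apply, hmax, PySem.List.len_eq, PySem.Int.floordiv_natCast,
    PySem.Int.mod_natCast]
  push_cast
  by_cases h : i < mn.toNat % vals.length
  · rw [if_pos h, if_pos (show (i:Int) < (mn.toNat:Int) % (vals.length:Int) by exact_mod_cast h)]
  · rw [if_neg h, if_neg (show ¬ (i:Int) < (mn.toNat:Int) % (vals.length:Int) by exact_mod_cast h)]

theorem pv_touch_eq (vals : List String) (mn mx : Int) (ip : String) (hv : vals ≠ []) :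
    pvTouch vals mn mx ip
      = (PySem.List.enumerate vals 0).any (fun p =>
          decide (0 < mx - mn ∧
            PySem.Int.mod (p.1 - PySem.Int.mod mn (PySem.List.len vals)) (PySem.List.len vals) < mx - mn)
          && p.2 == ip) := by
  have hN : 0 < vals.length := List.length_pos_iff.mpr hv
  have hn : (0 : Int) < (vals.length : Int) := by exact_mod_cast hN
  unfold pvTouch
  rw [pv_enum, List.any_map, Bool.eq_iff_iff, List.any_eq_true, List.any_eq_true]
  constructor
  · rintro ⟨k, hk, hip⟩
    rw [PySem.List.mem_pyRange_one] at hk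
    have hj0 : 0 ≤ k % (vals.length : Int) := Int.emod_nonneg _ (by omega)
    have hjn : k % (vals.length : Int) < (vals.length : Int) := Int.emod_lt_of_pos _ hn
    refine ⟨(k % (vals.length : Int)).toNat, List.mem_range.mpr (by omega), ?_⟩
    have hcast : (((k % (vals.length : Int)).toNat : Nat) : Int) = k % (vals.length : Int) :=
      Int.toNat_of_nonneg hj0
    simp only [Function.comp_apply, Bool.and_eq_true, decide_eq_true_eq, beq_iff_eq]
    constructor
    · have := (pv_res (vals.length : Int) mn mx (k % (vals.length : Int)) hn hj0 hjn).mp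
        ⟨k, hk, rfl⟩
      rw [PySem.List.len_eq, PySem.Int.mod_eq_emod_of_pos hn, PySem.Int.mod_eq_emod_of_pos hn, hcast]
      exact this
    · have : pvIdx vals k = vals.getD (k % (vals.length : Int)).toNat "" := by
        unfold pvIdx
        rw [PySem.List.len_eq, PySem.Int.mod_eq_emod_of_pos hn]
        conv_lhs => rw [← hcast]
        rw [PySem.List.pyGetD_natCast]
      rw [← this]
      exact beq_iff_eq.mp hip
  · rintro ⟨i, hi, hcond⟩
    have hiN : i < vals.length := List.mem_range.mp hi
    simp only [Function.comp_apply, Bool.and_eq_true, decide_eq_true_eq, beq_iff_eq] at hcond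
    obtain ⟨hc, hip⟩ := hcond
    rw [PySem.List.len_eq, PySem.Int.mod_eq_emod_of_pos hn, PySem.Int.mod_eq_emod_of_pos hn] at hc
    obtain ⟨k, hk, hkj⟩ :=
      (pv_res (vals.length : Int) mn mx (i : Int) hn (by omega) (by exact_mod_cast hiN)).mpr hc
    refine ⟨k, PySem.List.mem_pyRange_one.mpr hk, ?_⟩
    have : pvIdx vals k = vals.getD i "" := by
      unfold pvIdx
      rw [PySem.List.len_eq, PySem.Int.mod_eq_emod_of_pos hn, hkj, PySem.List.pyGetD_natCast]
    rw [this]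
    exact beq_iff_eq.mpr hip

-- ==== new pieces ====

theorem pv_mem_uniq (vals : List String) (hv : vals ≠ []) (k : Int) :
    pvIdx vals k ∈ PySem.Set.ofList vals := by
  rw [PySem.Set.mem_ofList]
  apply PySem.List.pyGetD_mem
  have hN : 0 < vals.length := List.length_pos_iff.mpr hv
  have hn : (0:Int) < (vals.length : Int) := by exact_mod_cast hN
  have h1 : PySem.Int.mod k (PySem.List.len vals) = k % (vals.length : Int) := by
    rw [PySem.List.len_eq, PySem.Int.mod_eq_emod_of_pos hn]
  constructor
  · rw [h1]; have := Int.emod_nonneg k (by omega : (vals.length:Int) ≠ 0); omega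
  · rw [h1]; exact Int.emod_lt_of_pos _ hn

theorem pv_mem_enum (vals : List String) (p : Int × String) (hp : p ∈ PySem.List.enumerate vals 0) :
    p.2 ∈ PySem.Set.ofList vals := by
  rw [PySem.Set.mem_ofList]
  rw [pv_enum] at hp
  obtain ⟨i, hi, rfl⟩ := List.mem_map.mp hp
  have hiN := List.mem_range.mp hi
  simpa [List.getD_eq_getElem?_getD, List.getElem?_eq_getElem hiN] using List.getElem_mem hiN

theorem pv_vals_ne_nil (nodes : List (String × String)) (h : nodes ≠ []) :
    (PySem.Dict.ofList nodes).values ≠ [] := by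
  have hkeys : (PySem.Dict.ofList nodes).keys = PySem.Set.ofList (nodes.map (·.1)) := by
    show ((nodes.foldl (fun d p => d.insert p.1 p.2) PySem.Dict.empty)).keys = _
    rw [PySem.Dict.keys_foldl_insert_key nodes (·.1) (fun _ p => p.2) PySem.Dict.empty,
      PySem.Dict.keys_empty, PySem.Set.update_nil_left]
  intro hc
  have : (PySem.Dict.ofList nodes).keys = [] := by
    simp only [PySem.Dict.keys, PySem.Dict.values] at hkeys hc ⊢
    rw [List.map_eq_nil_iff] at hc ⊢
    exact hc
  rw [hkeys] at this
  cases nodes with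
  | nil => exact h rfl
  | cons p t => rw [List.map_cons, PySem.Set.ofList_cons] at this; exact List.cons_ne_nil _ _ this

theorem pv_cpu (vals : List String) (mm g : Int) :
    vals.foldl (fun ps_specs node_ip =>
      (PySem.List.pyRange 0 mm 1).foldl
        (fun acc ps_ix => acc ++ [pvLabel node_ip (g + 100 + ps_ix)]) ps_specs) []
    = vals.flatMap (fun node_ip =>
        (PySem.List.pyRange 0 mm 1).map (fun ps_ix => pvLabel node_ip (g + 100 + ps_ix))) := by
  simp only [PySem.List.foldl_append_singleton_eq_map]
  rw [PySem.List.foldl_append_eq_flatMap]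
  simp

theorem pv_A_eq (vals : List String) (g mn mx : Int) (hv : vals ≠ [])
    (D2 : PySem.Dict String (List String))
    (hD2 : D2 = (PySem.List.pyRange mn mx 1).foldl (fun m ps_ix =>
        if (m.getD (pvIdx vals ps_ix) []).isEmpty then
          m.modify (pvIdx vals ps_ix) []
            (fun l => l ++ [pvLabel (pvIdx vals ps_ix) (g + 100 + (l.length : Int))])
        else m)
      ((PySem.List.pyRange 0 mn 1).foldl (fun m ps_ix =>
        m.modify (pvIdx vals ps_ix) []
          (fun l => l ++ [pvLabel (pvIdx vals ps_ix) (g + 100 + (l.length : Int))]))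
        (vals.foldl (fun m node_ip => m.insert node_ip []) PySem.Dict.empty))) :
    D2.keys.foldl (fun ps_specs node_ip => ps_specs ++ D2.getD node_ip []) []
      = (PySem.Set.ofList vals).flatMap (fun ip => pvLabels g ip (pvCA vals mn mx ip)) := by
  have hnd := PySem.Set.nodup_ofList vals
  have h0 : (vals.foldl (fun m ip => m.insert ip ([] : List String)) PySem.Dict.empty).items
      = (PySem.Set.ofList vals).map (fun ip => (ip, pvLabels g ip ((fun _ => 0) ip))) := by
    rw [pv_items_init]; simp [pvLabels]
  have h1 := pv_loop1 vals g (PySem.List.pyRange 0 mn 1) (PySem.Set.ofList vals) hnd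
    (fun k _ => pv_mem_uniq vals hv k) (fun _ => 0) _ h0
  simp only [Nat.zero_add] at h1
  have h2 := pv_loop2 vals g (PySem.List.pyRange mn mx 1) (PySem.Set.ofList vals) hnd
    (fun k _ => pv_mem_uniq vals hv k) (fun ip => pvC1 vals mn ip) _ h1
  rw [← hD2] at h2
  have hitems : D2.items = (PySem.Set.ofList vals).map fun ip => (ip, pvLabels g ip (pvCA vals mn mx ip)) := by
    rw [h2]
    apply List.map_congr_left
    intro ip _
    rfl
  rw [pv_keys_of_items _ _ _ hitems, PySem.List.foldl_append_eq_flatMap, List.nil_append]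
  apply List.flatMap_congr
  intro ip hip
  exact pv_getD_of_items _ hnd _ _ hitems ip hip []

theorem pv_B_eq (vals : List String) (g mn mx : Int) (hv : vals ≠ [])
    (c : PySem.Dict String Int) (t : PySem.Dict String Bool)
    (hct : (c, t) = (PySem.List.enumerate vals 0).foldl
        (fun (st : PySem.Dict String Int × PySem.Dict String Bool) p =>
          (st.1.modify p.2 0 (fun cc => cc + (PySem.Int.floordiv (max mn 0) (PySem.List.len vals)
              + if p.1 < PySem.Int.mod (max mn 0) (PySem.List.len vals) then 1 else 0)),
           if 0 < mx - mn ∧ PySem.Int.mod (p.1 - PySem.Int.mod mn (PySem.List.len vals)) (PySem.List.len vals) < mx - mn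
           then st.2.insert p.2 true else st.2))
        (vals.foldl (fun m node_ip => m.insert node_ip (0 : Int)) PySem.Dict.empty,
         vals.foldl (fun m node_ip => m.insert node_ip false) PySem.Dict.empty)) :
    c.items.flatMap (fun kv =>
        (PySem.List.pyRange 0 (if kv.2 ≠ 0 then kv.2 else if t.getD kv.1 false then 1 else 0) 1).map
          (fun j => pvLabel kv.1 (g + 100 + j)))
      = (PySem.Set.ofList vals).flatMap (fun ip => pvLabels g ip (pvCA vals mn mx ip)) := by
  have hnd := PySem.Set.nodup_ofList vals
  rw [PySem.List.foldl_prod_mk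
      (f := fun (m : PySem.Dict String Int) (p : Int × String) => m.modify p.2 0 (fun cc => cc + (PySem.Int.floordiv (max mn 0) (PySem.List.len vals)
              + if p.1 < PySem.Int.mod (max mn 0) (PySem.List.len vals) then 1 else 0)))
      (g := fun (m : PySem.Dict String Bool) (p : Int × String) =>
           if 0 < mx - mn ∧ PySem.Int.mod (p.1 - PySem.Int.mod mn (PySem.List.len vals)) (PySem.List.len vals) < mx - mn
           then m.insert p.2 true else m)] at hct
  have hc : c = (PySem.List.enumerate vals 0).foldl
      (fun m p => m.modify p.2 0 (fun cc => cc + (PySem.Int.floordiv (max mn 0) (PySem.List.len vals)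
        + if p.1 < PySem.Int.mod (max mn 0) (PySem.List.len vals) then 1 else 0))) 
      (vals.foldl (fun m node_ip => m.insert node_ip (0 : Int)) PySem.Dict.empty) := by
    exact congrArg Prod.fst hct
  have ht : t = (PySem.List.enumerate vals 0).foldl
      (fun m p => if 0 < mx - mn ∧ PySem.Int.mod (p.1 - PySem.Int.mod mn (PySem.List.len vals)) (PySem.List.len vals) < mx - mn
        then m.insert p.2 true else m)
      (vals.foldl (fun m node_ip => m.insert node_ip false) PySem.Dict.empty) := by
    exact congrArg Prod.snd hct
  have hcitems : c.items = (PySem.Set.ofList vals).map fun ip =>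
      (ip, ((pvC1 vals mn ip : Nat) : Int)) := by
    rw [hc, pv_loopC (fun i => PySem.Int.floordiv (max mn 0) (PySem.List.len vals)
        + if i < PySem.Int.mod (max mn 0) (PySem.List.len vals) then 1 else 0)
      (PySem.List.enumerate vals 0) _ hnd (fun p hp => pv_mem_enum vals p hp) (fun _ => 0) _
      (by rw [pv_items_init])]
    apply List.map_congr_left
    intro ip _
    rw [zero_add, pv_C1_eq vals mn ip hv]
  have htitems : t.items = (PySem.Set.ofList vals).map fun ip =>
      (ip, pvTouch vals mn mx ip) := by
    rw [ht, pv_loopT (fun i => 0 < mx - mn ∧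
        PySem.Int.mod (i - PySem.Int.mod mn (PySem.List.len vals)) (PySem.List.len vals) < mx - mn)
      (PySem.List.enumerate vals 0) _ hnd (fun p hp => pv_mem_enum vals p hp) (fun _ => false) _
      (by rw [pv_items_init])]
    apply List.map_congr_left
    intro ip _
    rw [Bool.false_or, pv_touch_eq vals mn mx ip hv]
  rw [hcitems, List.flatMap_map]
  apply List.flatMap_congr
  intro ip hip
  simp only
  rw [pv_getD_of_items _ hnd _ _ htitems ip hip false]
  have hval : (if ((pvC1 vals mn ip : Nat) : Int) ≠ 0 then ((pvC1 vals mn ip : Nat) : Int)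
      else if pvTouch vals mn mx ip then 1 else 0) = ((pvCA vals mn mx ip : Nat) : Int) := by
    unfold pvCA
    by_cases hz : pvC1 vals mn ip = 0
    · simp [hz]
    · simp [hz]
  rw [hval, PySem.List.pyRange_zero_nat, List.map_map]
  unfold pvLabels
  apply List.map_congr_left
  intro j _
  rfl


theorem pv_B_full (vals : List String) (g mn mx : Int) (hv : vals ≠ [])
    (c : PySem.Dict String Int) (t : PySem.Dict String Bool)
    (hct : (c, t) = (PySem.List.enumerate vals 0).foldl
        (fun (st : PySem.Dict String Int × PySem.Dict String Bool) p =>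
          (st.1.modify p.2 0 (fun cc => cc + (PySem.Int.floordiv (max mn 0) (PySem.List.len vals)
              + if p.1 < PySem.Int.mod (max mn 0) (PySem.List.len vals) then 1 else 0)),
           if 0 < mx - mn ∧ PySem.Int.mod (p.1 - PySem.Int.mod mn (PySem.List.len vals)) (PySem.List.len vals) < mx - mn
           then st.2.insert p.2 true else st.2))
        (vals.foldl (fun m node_ip => m.insert node_ip (0 : Int)) PySem.Dict.empty,
         vals.foldl (fun m node_ip => m.insert node_ip false) PySem.Dict.empty)) :
    (if PySem.List.len vals = 0 then ([] : List String) else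
      c.items.flatMap (fun kv =>
        (PySem.List.pyRange 0 (if kv.2 ≠ 0 then kv.2 else if t.getD kv.1 false then 1 else 0) 1).map
          (fun j => pvLabel kv.1 (g + 100 + j))))
      = (PySem.Set.ofList vals).flatMap (fun ip => pvLabels g ip (pvCA vals mn mx ip)) := by
  rw [if_neg (by
    rw [PySem.List.len_eq]
    intro h
    exact hv (List.length_eq_zero_iff.mp (by exact_mod_cast h)))]
  exact pv_B_eq vals g mn mx hv c t hct

-- ===== VERDICT (by name: the statement is the Claim_ definition above) =====
theorem get_ps_specs_py_spec : Claim_equal_get_ps_specs_py := by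
  unfold Claim_equal_get_ps_specs_py
  intro nodes mn mx cpu g _hdom hpre
  unfold Spec_get_ps_specs_py
  cases cpu with
  | true => exact pv_cpu ((PySem.Dict.ofList nodes).values) (max mn mx) g
  | false =>
    by_cases hnil : (PySem.Dict.ofList nodes).values = []
    · have hnodes : nodes = [] := by
        by_contra h
        exact pv_vals_ne_nil nodes h hnil
      have hb : mn ≤ 0 ∧ mx ≤ mn := by
        rcases hpre with h | h | h
        · simp at h
        · exact absurd hnodes h
        · exact h
      subst hnodes
      have e1 : PySem.List.pyRange 0 mn 1 = [] := PySem.List.pyRange_one_eq_nil hb.1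
      have e2 : PySem.List.pyRange mn mx 1 = [] := PySem.List.pyRange_one_eq_nil hb.2
      simp only [get_ps_specs_py, get_ps_specs_py_alt, e1, e2, List.foldl_nil]
      rfl
    · exact (pv_A_eq ((PySem.Dict.ofList nodes).values) g mn mx hnil _ rfl).trans
        (pv_B_full ((PySem.Dict.ofList nodes).values) g mn mx hnil _ _ rfl).symm
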